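-- pv_equiv track=rewrite | github.com/khanhnguyen21006/wikipedia_captioning | utils/tensor_utils.py | full_sampling
-- ===== SOURCE A (Python) =====
-- def full_sampling(n):
--     candidates = []
--     selected = []
--     matched = []
--     for i in range(n):
--         for j in range(n):
--             candidates.append(i)
--             selected.append(j)
--             if i == j:
--                 matched.append(1)
--             else:
--                 matched.append(-1)
--     return candidates, selected, matched
-- ===== SOURCE B (Python) =====
-- def full_sampling(n):
--     rng = list(range(n))
--     m = len(rng)
--     candidates = []
--     for i in rng:
--         candidates += [i] * m
--     selected = rng * m
--     matched = [-1] * (m * m)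
--     for i in rng:
--         matched[i * m + i] = 1
--     return candidates, selected, matched
-- ===== Notes on version B (the rewrite author's own statement) =====
-- stated objective: simpler
-- what changed: Replaces the single interleaved nested loop by three separate constructions: a comprehension for candidates, list repetition for selected, and a fill-with--1-then-patch-the-diagonal pass for matched.
import Mathlib
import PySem

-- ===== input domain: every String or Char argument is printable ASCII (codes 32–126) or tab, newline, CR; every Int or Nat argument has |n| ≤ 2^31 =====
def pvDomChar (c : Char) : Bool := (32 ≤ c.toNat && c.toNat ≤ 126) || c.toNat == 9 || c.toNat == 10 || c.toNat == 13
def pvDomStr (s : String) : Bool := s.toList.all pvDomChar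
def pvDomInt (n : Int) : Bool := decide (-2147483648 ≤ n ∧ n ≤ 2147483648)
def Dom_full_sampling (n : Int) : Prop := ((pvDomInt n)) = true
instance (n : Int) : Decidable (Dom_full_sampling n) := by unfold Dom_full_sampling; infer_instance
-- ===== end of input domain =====

-- B builds the three lists separately (comprehension, list repetition, fill-then-patch) instead of A's single interleaved nested loop; objective: simpler decomposition, same cost.

-- ===== PORT A =====
-- Python's list.append is modeled by Array.push (amortized O(1) append); the lists are read off at the end.
def full_sampling (n : Int) : List Int × List Int × List Int :=
  let r := (PySem.List.pyRange 0 n 1).foldl (fun acc i =>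
    (PySem.List.pyRange 0 n 1).foldl (fun acc2 j =>
      (acc2.1.push i, acc2.2.1.push j,
       acc2.2.2.push (if i == j then (1 : Int) else -1))) acc)
    (#[], #[], #[])
  (r.1.toList, r.2.1.toList, r.2.2.toList)

-- ===== PORT B =====
-- candidates += [i]*m is Array.append of a replicate row;
-- matched[i*m+i] = 1 is Array.setIfInBounds at the index (i*m+i).toNat: every i in rng is
-- nonnegative and the index is in range, so this is exact for Python's list assignment here.
def full_sampling_alt (n : Int) : List Int × List Int × List Int :=
  let rng := PySem.List.pyRange 0 n 1
  let m := rng.length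
  let candidates := (rng.foldl (fun acc i => acc ++ (List.replicate m i).toArray)
                     (#[] : Array Int)).toList
  let selected := (List.replicate m rng).flatten
  let matched := (rng.foldl (fun acc i => acc.setIfInBounds (i * (m : Int) + i).toNat 1)
                   (Array.replicate (m * m) (-1 : Int))).toList
  (candidates, selected, matched)

-- ===== PRECONDITION & SPEC =====
def Spec_full_sampling (n : Int) (out : List Int × List Int × List Int) : Prop := out = full_sampling_alt n
instance (n : Int) (out : List Int × List Int × List Int) : Decidable (Spec_full_sampling n out) := by unfold Spec_full_sampling; infer_instance

-- ===== CLAIM (what is proved, stated in full; the proofs are below) =====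
def Claim_equal_full_sampling : Prop := ∀ (n : Int), Dom_full_sampling n → Spec_full_sampling n (full_sampling n)

-- ===== LEMMAS AND PROOFS =====

-- list-level shadow of A's fold (arrays replaced by lists), used only in the proofs
def fsList (n : Int) : List Int × List Int × List Int :=
  (PySem.List.pyRange 0 n 1).foldl (fun acc i =>
    (PySem.List.pyRange 0 n 1).foldl (fun acc2 j =>
      (acc2.1 ++ [i], acc2.2.1 ++ [j],
       acc2.2.2 ++ [if i == j then (1 : Int) else -1])) acc)
    ([], [], [])

-- reading the three arrays of A's fold as lists gives the list-level fold
theorem full_sampling_eq_fsList (n : Int) : full_sampling n = fsList n := by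
  unfold full_sampling fsList
  generalize PySem.List.pyRange 0 n 1 = rng
  have h := List.foldl_hom
    (f := fun p : Array Int × Array Int × Array Int => (p.1.toList, p.2.1.toList, p.2.2.toList))
    (g₁ := fun acc i => rng.foldl (fun acc2 j => (acc2.1.push i, acc2.2.1.push j,
      acc2.2.2.push (if i == j then (1 : Int) else -1))) acc)
    (g₂ := fun acc i => rng.foldl (fun acc2 j => (acc2.1 ++ [i], acc2.2.1 ++ [j],
      acc2.2.2 ++ [if i == j then (1 : Int) else -1])) acc)
    (l := rng) (init := (#[], #[], #[]))
    (fun acc i => by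
      exact List.foldl_hom
        (f := fun p : Array Int × Array Int × Array Int => (p.1.toList, p.2.1.toList, p.2.2.toList))
        (g₁ := fun acc2 j => (acc2.1.push i, acc2.2.1.push j,
          acc2.2.2.push (if i == j then (1 : Int) else -1)))
        (g₂ := fun acc2 j => (acc2.1 ++ [i], acc2.2.1 ++ [j],
          acc2.2.2 ++ [if i == j then (1 : Int) else -1]))
        (l := rng) (init := acc)
        (fun acc2 j => by simp))
  simpa using h.symm

-- flatMap of singletons is a map
theorem flatMap_singleton_map {α β : Type} (f : α → β) (l : List α) :
    l.flatMap (fun x => [f x]) = l.map f := by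
  induction l with
  | nil => rfl
  | cons x xs ih => simp [ih]

-- A's interleaved loop body appends one element to each component; in closed form it is three flatMaps.
theorem triple_fold {α β : Type} (f g h : α → List β) (xs : List α) (a b c : List β) :
    xs.foldl (fun acc i => (acc.1 ++ f i, acc.2.1 ++ g i, acc.2.2 ++ h i)) (a, b, c)
      = (a ++ xs.flatMap f, b ++ xs.flatMap g, c ++ xs.flatMap h) := by
  induction xs generalizing a b c with
  | nil => simp
  | cons x xs ih => simp [List.foldl_cons, ih]

theorem fsList_closed (n : Int) :
    fsList n =
      ((PySem.List.pyRange 0 n 1).flatMap (fun i => (PySem.List.pyRange 0 n 1).map (fun _ => i)),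
       (PySem.List.pyRange 0 n 1).flatMap (fun _ => PySem.List.pyRange 0 n 1),
       (PySem.List.pyRange 0 n 1).flatMap (fun i =>
         (PySem.List.pyRange 0 n 1).map (fun j => if i == j then (1 : Int) else -1))) := by
  unfold fsList
  generalize PySem.List.pyRange 0 n 1 = rng
  have hfun : (fun (acc : List Int × List Int × List Int) (i : Int) =>
      rng.foldl (fun acc2 j => (acc2.1 ++ [i], acc2.2.1 ++ [j],
        acc2.2.2 ++ [if i == j then (1 : Int) else -1])) acc)
      = fun acc i => (acc.1 ++ rng.flatMap (fun _ => [i]),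
          acc.2.1 ++ rng.flatMap (fun j => [j]),
          acc.2.2 ++ rng.flatMap (fun j => [if i == j then (1 : Int) else -1])) := by
    funext acc i
    obtain ⟨a, b, c⟩ := acc
    exact triple_fold _ _ _ rng a b c
  rw [hfun, triple_fold]
  simp [flatMap_singleton_map]

-- list repetition: xs * len(l) as a flatMap over l
theorem flatMap_const {α β : Type} (l : List α) (ys : List β) :
    l.flatMap (fun _ => ys) = (List.replicate l.length ys).flatten := by
  induction l with
  | nil => simp
  | cons x xs ih => simp [List.replicate_succ, ih]

-- length of the patched matched list
theorem foldl_set_length (pos : Nat → Nat) (xs : List Nat) (acc : List Int) :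
    (xs.foldl (fun a i => a.set (pos i) (1 : Int)) acc).length = acc.length := by
  induction xs generalizing acc with
  | nil => rfl
  | cons x xs ih => simp [List.foldl_cons, ih]

-- element of the patched matched list: 1 where some i of xs hits, the old value elsewhere
theorem foldl_set_get? (pos : Nat → Nat) (xs : List Nat) (acc : List Int) (k : Nat)
    (hk : k < acc.length) :
    (xs.foldl (fun a i => a.set (pos i) (1 : Int)) acc)[k]?
      = if (∃ i ∈ xs, pos i = k) then some 1 else acc[k]? := by
  induction xs generalizing acc with
  | nil => simp
  | cons x xs ih =>
    rw [List.foldl_cons, ih _ (by simpa using hk)]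
    by_cases hx : pos x = k <;> by_cases hxs : ∃ i ∈ xs, pos i = k <;>
      simp [hx, hxs, hk]

-- the diagonal rows as one map over range (M*N)
theorem rows_eq (N M : Nat) :
    (List.range M).flatMap (fun i => (List.range N).map (fun j => if i = j then (1 : Int) else -1))
      = (List.range (M * N)).map (fun k => if k / N = k % N then (1 : Int) else -1) := by
  induction M with
  | zero => simp
  | succ M ih =>
    rw [List.range_succ, List.flatMap_append, ih, Nat.succ_mul, List.range_add, List.map_append]
    congr 1
    simp only [List.flatMap_cons, List.flatMap_nil, List.append_nil, List.map_map]
    refine List.map_congr_left (fun j hj => ?_)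
    have hjN : j < N := List.mem_range.mp hj
    have hN : 0 < N := by omega
    have hdiv : (M * N + j) / N = M := by
      rw [Nat.mul_comm M N, Nat.mul_add_div hN, Nat.div_eq_of_lt hjN, Nat.add_zero]
    have hmod : (M * N + j) % N = j := by
      rw [Nat.mul_comm M N, Nat.mul_add_mod, Nat.mod_eq_of_lt hjN]
    simp [Function.comp, hdiv, hmod]

-- fill-then-patch equals the one-map closed form
theorem matched_eq (N : Nat) :
    (List.range N).foldl (fun a i => a.set (i * N + i) (1 : Int))
        (List.replicate (N * N) (-1 : Int))
      = (List.range (N * N)).map (fun k => if k / N = k % N then (1 : Int) else -1) := by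
  apply List.ext_getElem?
  intro k
  by_cases hk : k < N * N
  · rw [foldl_set_get? (fun i => i * N + i) _ _ k (by simpa using hk)]
    have hiff : (∃ i ∈ List.range N, i * N + i = k) ↔ k / N = k % N := by
      constructor
      · rintro ⟨i, hi, rfl⟩
        have hiN : i < N := List.mem_range.mp hi
        have hN : 0 < N := by omega
        have hdiv : (i * N + i) / N = i := by
          rw [Nat.mul_comm i N, Nat.mul_add_div hN, Nat.div_eq_of_lt hiN, Nat.add_zero]
        have hmod : (i * N + i) % N = i := by
          rw [Nat.mul_comm i N, Nat.mul_add_mod, Nat.mod_eq_of_lt hiN]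
        rw [hdiv, hmod]
      · intro h
        have hN : 0 < N := by
          rcases Nat.eq_zero_or_pos N with rfl | h0
          · omega
          · exact h0
        refine ⟨k / N, List.mem_range.mpr ((Nat.div_lt_iff_lt_mul hN).mpr hk), ?_⟩
        calc k / N * N + k / N = N * (k / N) + k % N := by rw [Nat.mul_comm, h]
          _ = k := Nat.div_add_mod k N
    have hR : ((List.range (N * N)).map
        (fun k => if k / N = k % N then (1 : Int) else -1))[k]?
        = some (if k / N = k % N then (1 : Int) else -1) := by
      simp [hk]
    have hL : (List.replicate (N * N) (-1 : Int))[k]? = some (-1) := by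
      simp [hk]
    rw [hR, hL]
    by_cases hd : k / N = k % N
    · rw [if_pos (hiff.mpr hd), if_pos hd]
    · rw [if_neg (fun h => hd (hiff.mp h)), if_neg hd]
  · have hle : N * N ≤ k := Nat.le_of_not_lt hk
    have h1 : ((List.range N).foldl (fun a i => a.set (i * N + i) (1 : Int))
        (List.replicate (N * N) (-1 : Int))).length = N * N := by
      rw [foldl_set_length (fun i => i * N + i)]; simp
    rw [List.getElem?_eq_none (by rw [h1]; exact hle),
        List.getElem?_eq_none (by simpa using hle)]

theorem full_sampling_eq_alt (n : Int) : full_sampling n = full_sampling_alt n := by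
  rw [full_sampling_eq_fsList, fsList_closed]
  unfold full_sampling_alt
  -- read B's matched array-fold back as the list-fold
  have harr : ∀ (rng : List Int) (m : Nat),
      ((rng.foldl (fun acc i => acc.setIfInBounds (i * (m : Int) + i).toNat 1)
        (Array.replicate (m * m) (-1 : Int)))).toList
      = rng.foldl (fun acc i => acc.set (i * (m : Int) + i).toNat 1)
          (List.replicate (m * m) (-1 : Int)) := by
    intro rng m
    have h := List.foldl_hom (f := Array.toList (α := Int))
      (g₁ := fun acc i => acc.setIfInBounds ((i : Int) * (m : Int) + i).toNat 1)
      (g₂ := fun acc i => acc.set ((i : Int) * (m : Int) + i).toNat 1)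
      (l := rng) (init := Array.replicate (m * m) (-1 : Int))
      (fun acc i => by simp)
    simpa using h.symm
  -- read B's candidates array-fold back as a flatMap of rows
  have hcand : ∀ (rng : List Int) (m : Nat),
      ((rng.foldl (fun acc i => acc ++ (List.replicate m i).toArray) (#[] : Array Int))).toList
      = rng.flatMap (fun i => List.replicate m i) := by
    intro rng m
    have h := List.foldl_hom (f := Array.toList (α := Int))
      (g₁ := fun acc i => acc ++ (List.replicate m i).toArray)
      (g₂ := fun acc i => acc ++ List.replicate m i)
      (l := rng) (init := (#[] : Array Int))
      (fun acc i => by simp)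
    rw [← h]
    simpa using (PySem.List.foldl_append_eq_flatMap (fun i => List.replicate m i) rng [])
  simp only [PySem.List.pyRange_zero, List.length_map, List.length_range, harr, hcand,
    Prod.mk.injEq]
  set N := n.toNat with hNdef
  refine ⟨?_, ?_, ?_⟩
  · refine List.flatMap_congr (fun i _ => ?_)
    simp [Function.comp_def, List.map_const']
  · rw [flatMap_const]
    simp
  · have hstep : ∀ (acc : List Int) (i : Nat),
        acc.set (((i : Int) * (N : Int) + (i : Int)).toNat) 1 = acc.set (i * N + i) 1 := by
      intro acc i
      have hc : ((i : Int) * (N : Int) + (i : Int)) = ((i * N + i : Nat) : Int) := by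
        push_cast; ring
      rw [hc, Int.toNat_natCast]
    rw [List.foldl_map]
    simp only [hstep]
    rw [matched_eq]
    simp only [List.flatMap_map, List.map_map, Function.comp_def, beq_iff_eq, Nat.cast_inj]
    rw [rows_eq]

-- ===== VERDICT (by name: the statement is the Claim_ definition above) =====
theorem full_sampling_spec : Claim_equal_full_sampling := by
  intro n _
  exact full_sampling_eq_alt n
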